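-- pv_equiv track=rewrite | github.com/Joel-T-George/Flames_Game__Fun_With_Relation | Flames_PyQt5/flames.py | CompareStrike
-- ===== SOURCE A (Python) =====
-- def CompareStrike(p1,p2):
-- 	l1= list(p1)
-- 	l2 = list(p2)
-- 	m=[]
-- 	for x in range(len(p1)):
-- 		for y in range(len(p2)):
-- 			if l1[x] == l2[y]:
-- 				l1[x],l2[y] = "0","0"
-- 				m.append("0")
-- 				break
-- 	for j in m:
-- 		l1.remove("0")
-- 		l2.remove("0")
-- 	l1.extend(l2)
-- 	i="".join(l1)
-- 	del m
-- 	return i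
-- ===== SOURCE B (Python) =====
-- def CompareStrike(p1, p2):
--     # Count-based one-pass strike: no quadratic scans, no list mutation.
--     c2 = {}
--     for ch in p2:
--         c2[ch] = c2.get(ch, 0) + 1
--     used = {}
--     out = []
--     for ch in p1:
--         if used.get(ch, 0) < c2.get(ch, 0):
--             used[ch] = used.get(ch, 0) + 1
--         else:
--             out.append(ch)
--     seen = {}
--     for ch in p2:
--         seen[ch] = seen.get(ch, 0) + 1
--         if seen[ch] > used.get(ch, 0):
--             out.append(ch)
--     return "".join(out)
-- ===== Notes on version B (the rewrite author's own statement) =====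
-- stated objective: faster
-- what changed: Replaces A's nested index scans with in-place '0'-sentinel marking followed by a quadratic remove() phase by two linear counting-dict passes that emit each string's leftover characters directly.
-- outside the precondition, e.g. on CompareStrike('YJVPV', '0.PDU'): A returns 'YJVV.0DU', B returns 'YJVV0.DU'; on CompareStrike('00', 'a0'): A raises ValueError, B returns '0a'
import Mathlib
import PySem

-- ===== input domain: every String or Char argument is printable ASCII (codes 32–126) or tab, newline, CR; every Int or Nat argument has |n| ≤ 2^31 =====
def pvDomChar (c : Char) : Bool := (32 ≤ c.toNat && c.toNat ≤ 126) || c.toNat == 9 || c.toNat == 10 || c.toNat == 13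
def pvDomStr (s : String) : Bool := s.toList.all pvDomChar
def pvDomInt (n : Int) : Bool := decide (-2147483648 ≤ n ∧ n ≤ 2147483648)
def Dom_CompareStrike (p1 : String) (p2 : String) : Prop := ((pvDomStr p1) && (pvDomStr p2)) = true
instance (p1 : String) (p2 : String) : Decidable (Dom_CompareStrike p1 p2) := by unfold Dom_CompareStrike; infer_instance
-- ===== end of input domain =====

-- B replaces A's nested sentinel-marking scans and quadratic remove() phase by two linear
-- counting-dict passes (objective: faster); return values proved equal on Pre_.

-- ===== PORT A =====
-- inner loop: 'for y in range(len(p2)): if l1[x] == l2[y]: l1[x],l2[y] = "0","0"; m.append("0"); break'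
-- (the list elements are single-character strings; ported as Char, the sentinel "0" as '0')
def pyStrikeInner (c : Char) : List Char → Option (List Char)
  | [] => none
  | d :: ds =>
    if c == d then some ('0' :: ds)
    else
      match pyStrikeInner c ds with
      | some ds' => some (d :: ds')
      | none => none

-- one outer-loop iteration at index x (indices from range(len(p1)) are nonnegative, so Nat indexing is exact)
def pyStrikeStep (st : List Char × List Char × List Char) (x : Nat) : List Char × List Char × List Char :=
  match st.1[x]? with
  | none => st
  | some c =>
    match pyStrikeInner c st.2.1 with
    | some l2' => (st.1.set x '0', l2', st.2.2 ++ ['0'])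
    | none => st

def CompareStrike (p1 : String) (p2 : String) : String :=
  let st := (List.range p1.toList.length).foldl pyStrikeStep (p1.toList, p2.toList, ([] : List Char))
  let pr := st.2.2.foldl
    (fun (pr : List Char × List Char) _ =>
      ((PySem.List.remove? pr.1 '0').getD pr.1, (PySem.List.remove? pr.2 '0').getD pr.2))
    (st.1, st.2.1)
  String.ofList (pr.1 ++ pr.2)

-- ===== PORT B =====
def CompareStrike_alt (p1 : String) (p2 : String) : String :=
  let c2 := p2.toList.foldl (fun d ch => d.insert ch (d.getD ch 0 + 1))
              (PySem.Dict.empty : PySem.Dict Char Int)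
  let st1 := p1.toList.foldl
    (fun (st : PySem.Dict Char Int × List Char) ch =>
      if st.1.getD ch 0 < c2.getD ch 0 then (st.1.insert ch (st.1.getD ch 0 + 1), st.2)
      else (st.1, st.2 ++ [ch]))
    ((PySem.Dict.empty : PySem.Dict Char Int), ([] : List Char))
  let used := st1.1
  let st2 := p2.toList.foldl
    (fun (st : PySem.Dict Char Int × List Char) ch =>
      let s := st.1.insert ch (st.1.getD ch 0 + 1)
      if s.getD ch 0 > used.getD ch 0 then (s, st.2 ++ [ch]) else (s, st.2))
    ((PySem.Dict.empty : PySem.Dict Char Int), st1.2)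
  String.ofList st2.2

-- ===== PRECONDITION & SPEC =====
-- Pre_ excludes inputs where A's use of the string "0" as its strike sentinel conflates real
-- '0' characters with markers: a '0' in p1 can strike a marker (A then sometimes raises
-- ValueError from list.remove and otherwise returns an accidental value), and a '0' in p2
-- that precedes a struck position makes the final remove("0") phase delete the real '0'
-- instead of a marker, returning an accidental, sentinel-shuffled value; kept inside Pre_
-- are all inputs with no '0' in p1 where additionally the '0's of p2 form a trailing block
-- (this includes every '0'-free p2) or p1 and p2 share no character (no strikes at all).
def Pre_CompareStrike (p1 : String) (p2 : String) : Prop :=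
  '0' ∉ p1.toList ∧
  ((p2.toList.dropWhile (· ≠ '0')).all (· == '0') = true
    ∨ p1.toList.all (fun c => !p2.toList.contains c) = true)
instance (p1 : String) (p2 : String) : Decidable (Pre_CompareStrike p1 p2) := by
  unfold Pre_CompareStrike; infer_instance

def pvWitness_CompareStrike : String × String := ("hello", "world")

def Spec_CompareStrike (p1 : String) (p2 : String) (out : String) : Prop := out = CompareStrike_alt p1 p2
instance (p1 : String) (p2 : String) (out : String) : Decidable (Spec_CompareStrike p1 p2 out) := by unfold Spec_CompareStrike; infer_instance

-- ===== CLAIM (what is proved, stated in full; the proofs are below) =====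
def Claim_equal_CompareStrike : Prop := ∀ (p1 : String) (p2 : String), Dom_CompareStrike p1 p2 → Pre_CompareStrike p1 p2 → Spec_CompareStrike p1 p2 (CompareStrike p1 p2)

-- ===== LEMMAS AND PROOFS =====

-- pointwise increment / decrement of a character-counter function
def chInc (g : Char → Nat) (c : Char) : Char → Nat := fun d => if d = c then g d + 1 else g d
def chDec (g : Char → Nat) (c : Char) : Char → Nat := fun d => if d = c then g d - 1 else g d

def maskL : List Char → (Char → Nat) → List Char
  | [], _ => []
  | c :: cs, g => if 0 < g c then '0' :: maskL cs (chDec g c) else c :: maskL cs g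

theorem chDec_chInc_self (g : Char → Nat) (c : Char) : chDec (chInc g c) c = g := by
  funext e; simp only [chDec, chInc]; split <;> simp_all

theorem chInc_chDec_self (g : Char → Nat) (c : Char) (h : 0 < g c) : chInc (chDec g c) c = g := by
  funext e; simp only [chDec, chInc]; split <;> rename_i he <;> [skip; rfl]
  subst he; omega

theorem chDec_chInc_comm (g : Char → Nat) (c d : Char) (h : d ≠ c) :
    chDec (chInc g c) d = chInc (chDec g d) c := by
  funext e; simp only [chDec, chInc]
  by_cases h1 : e = d <;> by_cases h2 : e = c <;> simp_all

theorem chInc_apply_self (g : Char → Nat) (c : Char) : chInc g c c = g c + 1 := by simp [chInc]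
theorem chInc_apply_ne (g : Char → Nat) (c d : Char) (h : d ≠ c) : chInc g c d = g d := by simp [chInc, h]
theorem chDec_apply_self (g : Char → Nat) (c : Char) : chDec g c c = g c - 1 := by simp [chDec]
theorem chDec_apply_ne (g : Char → Nat) (c d : Char) (h : d ≠ c) : chDec g c d = g d := by simp [chDec, h]

theorem pyStrikeInner_maskL (s2 : List Char) : ∀ (g : Char → Nat) (c : Char), c ≠ '0' →
    pyStrikeInner c (maskL s2 g) =
      if g c < s2.count c then some (maskL s2 (chInc g c)) else none := by
  induction s2 with
  | nil => intro g c hc; simp [maskL, pyStrikeInner]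
  | cons d ds ih =>
    intro g c hc
    by_cases hgd : 0 < g d
    · simp only [maskL, if_pos hgd]
      by_cases hdc : d = c
      · subst hdc
        have hne : (d == '0') = false := by simp [hc]
        simp only [pyStrikeInner, hne, Bool.false_eq_true, if_false]
        rw [ih (chDec g d) d hc, chDec_apply_self, List.count_cons_self]
        by_cases hlt : g d - 1 < ds.count d
        · rw [if_pos hlt, if_pos (by omega)]
          rw [chInc_chDec_self g d hgd]
          simp only [maskL, chInc_apply_self, if_pos (by omega : 0 < g d + 1), chDec_chInc_self]
        · rw [if_neg hlt, if_neg (by omega)]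
      · have hne : (c == d) = false := by simp [Ne.symm hdc]
        have hne0 : (c == '0') = false := by simp [hc]
        simp only [pyStrikeInner, hne0, Bool.false_eq_true, if_false]
        rw [ih (chDec g d) c hc, chDec_apply_ne g d c (Ne.symm hdc),
            List.count_cons_of_ne hdc]
        by_cases hlt : g c < ds.count c
        · rw [if_pos hlt, if_pos hlt]
          simp only [maskL, chInc_apply_ne g c d hdc, if_pos hgd, chDec_chInc_comm g c d hdc]
        · rw [if_neg hlt, if_neg hlt]
    · simp only [maskL, if_neg hgd]
      by_cases hdc : d = c
      · subst hdc
        have hg0 : g d = 0 := by omega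
        simp only [pyStrikeInner, beq_self_eq_true, if_pos, List.count_cons_self]
        rw [if_pos (by omega)]
        simp only [maskL, chInc_apply_self, if_pos (by omega : 0 < g d + 1), chDec_chInc_self]
      · have hne : (c == d) = false := by simp [Ne.symm hdc]
        simp only [pyStrikeInner, hne, Bool.false_eq_true, if_false]
        rw [ih g c hc, List.count_cons_of_ne hdc]
        by_cases hlt : g c < ds.count c
        · simp [hlt, chInc_apply_ne g c d hdc, hgd]
        · simp [hlt]

def out1 (cnt : Char → Nat) : List Char → (Char → Nat) → List Char
  | [], _ => []
  | c :: cs, g => if g c < cnt c then out1 cnt cs (chInc g c) else c :: out1 cnt cs g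

def procG (cnt : Char → Nat) : List Char → (Char → Nat) → (Char → Nat)
  | [], g => g
  | c :: cs, g => if g c < cnt c then procG cnt cs (chInc g c) else procG cnt cs g

def procL1 (cnt : Char → Nat) : List Char → (Char → Nat) → List Char
  | [], _ => []
  | c :: cs, g => if g c < cnt c then '0' :: procL1 cnt cs (chInc g c) else c :: procL1 cnt cs g

def procM (cnt : Char → Nat) : List Char → (Char → Nat) → Nat
  | [], _ => 0
  | c :: cs, g => if g c < cnt c then procM cnt cs (chInc g c) + 1 else procM cnt cs g

theorem set_append_cons (pre : List Char) (c x : Char) (cs : List Char) :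
    (pre ++ c :: cs).set pre.length x = pre ++ x :: cs := by
  induction pre with
  | nil => rfl
  | cons a t ih => simp [List.set, ih]

theorem outer_inv (s2 : List Char) (rest : List Char) :
    ∀ (pre : List Char) (g : Char → Nat) (m : List Char), (∀ c ∈ rest, c ≠ '0') →
    (List.range' pre.length rest.length).foldl pyStrikeStep (pre ++ rest, maskL s2 g, m)
      = (pre ++ procL1 (fun c => s2.count c) rest g,
         maskL s2 (procG (fun c => s2.count c) rest g),
         m ++ List.replicate (procM (fun c => s2.count c) rest g) '0') := by
  induction rest with
  | nil => intro pre g m _; simp [procL1, procG, procM]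
  | cons c cs ih =>
    intro pre g m hc
    have hc0 : c ≠ '0' := hc c (List.mem_cons_self ..)
    have hcs : ∀ d ∈ cs, d ≠ '0' := fun d hd => hc d (List.mem_cons_of_mem _ hd)
    rw [List.length_cons, List.range'_succ, List.foldl_cons]
    have hstep : pyStrikeStep (pre ++ c :: cs, maskL s2 g, m) (pre.length)
        = if g c < s2.count c
          then (pre ++ '0' :: cs, maskL s2 (chInc g c), m ++ ['0'])
          else (pre ++ c :: cs, maskL s2 g, m) := by
      simp only [pyStrikeStep, List.getElem?_append_right (le_refl pre.length),
        Nat.sub_self, List.getElem?_cons_zero]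
      rw [pyStrikeInner_maskL s2 g c hc0]
      by_cases hlt : g c < s2.count c
      · rw [set_append_cons]; simp [hlt]
      · simp [hlt]
    rw [hstep]
    by_cases hlt : g c < s2.count c
    · rw [if_pos hlt]
      have := ih (pre ++ ['0']) (chInc g c) (m ++ ['0']) hcs
      simp only [List.length_append, List.length_cons, List.length_nil] at this ⊢
      rw [show pre ++ ['0'] ++ cs = pre ++ '0' :: cs by simp] at this
      rw [show pre.length + 1 = pre.length + (0 + 1) by omega] at this
      rw [this]
      simp only [procL1, procG, procM, if_pos hlt]
      simp [List.replicate_succ]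
    · rw [if_neg hlt]
      have := ih (pre ++ [c]) g m hcs
      simp only [List.length_append, List.length_cons, List.length_nil] at this ⊢
      rw [show pre ++ [c] ++ cs = pre ++ c :: cs by simp] at this
      rw [show pre.length + 1 = pre.length + (0 + 1) by omega] at this
      rw [this]
      simp only [procL1, procG, procM, if_neg hlt]
      simp

def sKeep : List Char → (Char → Nat) → List Char
  | [], _ => []
  | c :: cs, g => if 0 < g c then sKeep cs (chDec g c) else c :: sKeep cs g

theorem count0_procL1 (cnt : Char → Nat) (rest : List Char) :
    ∀ g, (∀ c ∈ rest, c ≠ '0') →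
    (procL1 cnt rest g).count '0' = procM cnt rest g := by
  induction rest with
  | nil => intro g _; rfl
  | cons c cs ih =>
    intro g hc
    have hc0 : c ≠ '0' := hc c (List.mem_cons_self ..)
    have hcs : ∀ d ∈ cs, d ≠ '0' := fun d hd => hc d (List.mem_cons_of_mem _ hd)
    by_cases hlt : g c < cnt c
    · simp [procL1, procM, hlt, ih _ hcs]
    · simp [procL1, procM, hlt, ih _ hcs, List.count_cons_of_ne hc0]

theorem count0_maskL_inc (s2 : List Char) (h0 : '0' ∉ s2) :
    ∀ (g : Char → Nat) (c : Char), c ≠ '0' → g c < s2.count c →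
    (maskL s2 (chInc g c)).count '0' = (maskL s2 g).count '0' + 1 := by
  induction s2 with
  | nil => intro g c _ h; simp at h
  | cons d ds ih =>
    intro g c hc hlt
    have h0d : d ≠ '0' := fun h => h0 (h ▸ List.mem_cons_self ..)
    have h0s : '0' ∉ ds := fun h => h0 (List.mem_cons_of_mem _ h)
    by_cases hdc : d = c
    · subst hdc
      rw [List.count_cons_self] at hlt
      by_cases hgd : 0 < g d
      · have h' : chDec g d d < ds.count d := by rw [chDec_apply_self]; omega
        have := ih h0s (chDec g d) d hc h'
        rw [chInc_chDec_self g d hgd] at this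
        simp only [maskL, chInc_apply_self, if_pos (by omega : 0 < g d + 1), if_pos hgd,
          chDec_chInc_self, List.count_cons_self]
        omega
      · simp only [maskL, chInc_apply_self, if_pos (by omega : 0 < g d + 1), if_neg hgd,
          chDec_chInc_self, List.count_cons_self]
        rw [List.count_cons_of_ne h0d]
    · rw [List.count_cons_of_ne hdc] at hlt
      by_cases hgd : 0 < g d
      · have h' : chDec g d c < ds.count c := by rw [chDec_apply_ne g d c (Ne.symm hdc)]; omega
        have := ih h0s (chDec g d) c hc h'
        simp only [maskL, chInc_apply_ne g c d hdc, if_pos hgd, List.count_cons_self]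
        rw [chDec_chInc_comm g c d hdc]
        omega
      · simp only [maskL, chInc_apply_ne g c d hdc, if_neg hgd]
        rw [List.count_cons_of_ne h0d, List.count_cons_of_ne h0d]
        exact ih h0s g c hc hlt

theorem count0_maskL_procG (s2 : List Char) (h0 : '0' ∉ s2) (cnt : Char → Nat) (rest : List Char) :
    ∀ g, (∀ c ∈ rest, c ≠ '0') → (∀ c ∈ rest, cnt c = s2.count c) →
    (maskL s2 (procG cnt rest g)).count '0'
      = (maskL s2 g).count '0' + procM cnt rest g := by
  induction rest with
  | nil => intro g _ _; rfl
  | cons c cs ih =>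
    intro g hc hcnt
    have hc0 : c ≠ '0' := hc c (List.mem_cons_self ..)
    have hcs : ∀ d ∈ cs, d ≠ '0' := fun d hd => hc d (List.mem_cons_of_mem _ hd)
    have hcnts : ∀ d ∈ cs, cnt d = s2.count d := fun d hd => hcnt d (List.mem_cons_of_mem _ hd)
    by_cases hlt : g c < cnt c
    · simp only [procG, procM, if_pos hlt]
      rw [ih _ hcs hcnts, count0_maskL_inc s2 h0 g c hc0
        (by rw [← hcnt c (List.mem_cons_self ..)]; exact hlt)]
      omega
    · simp only [procG, procM, if_neg hlt]
      exact ih _ hcs hcnts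

theorem filter_procL1 (cnt : Char → Nat) (rest : List Char) :
    ∀ g, (∀ c ∈ rest, c ≠ '0') →
    (procL1 cnt rest g).filter (· ≠ '0') = out1 cnt rest g := by
  induction rest with
  | nil => intro g _; rfl
  | cons c cs ih =>
    intro g hc
    have hc0 : c ≠ '0' := hc c (List.mem_cons_self ..)
    have hcs : ∀ d ∈ cs, d ≠ '0' := fun d hd => hc d (List.mem_cons_of_mem _ hd)
    by_cases hlt : g c < cnt c
    · simp only [procL1, out1, if_pos hlt]
      rw [List.filter_cons_of_neg (by simp)]
      exact ih _ hcs
    · simp only [procL1, out1, if_neg hlt]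
      rw [List.filter_cons_of_pos (by simp [hc0])]
      rw [ih _ hcs]

theorem filter_maskL (s2 : List Char) (h0 : '0' ∉ s2) :
    ∀ g, (maskL s2 g).filter (· ≠ '0') = sKeep s2 g := by
  induction s2 with
  | nil => intro g; rfl
  | cons d ds ih =>
    intro g
    have h0d : d ≠ '0' := fun h => h0 (h ▸ List.mem_cons_self ..)
    have h0s : '0' ∉ ds := fun h => h0 (List.mem_cons_of_mem _ h)
    by_cases hgd : 0 < g d
    · simp only [maskL, sKeep, if_pos hgd]
      rw [List.filter_cons_of_neg (by simp)]
      exact ih h0s _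
    · simp only [maskL, sKeep, if_neg hgd]
      rw [List.filter_cons_of_pos (by simp [h0d])]
      rw [ih h0s]

theorem remove0_cons_pos (t : List Char) : PySem.List.remove? ('0'::t) '0' = some t := by
  simp [PySem.List.remove?, List.idxOf?_cons]

theorem remove0_cons_neg (a : Char) (t : List Char) (h : a ≠ '0') :
    PySem.List.remove? (a::t) '0' = (PySem.List.remove? t '0').map (a :: ·) := by
  simp [PySem.List.remove?, List.idxOf?_cons, h]
  cases List.idxOf? '0' t <;> simp

theorem b_pass1 (cnt : Char → Nat) (c2 : PySem.Dict Char Int)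
    (hc2 : ∀ c, c2.getD c 0 = (cnt c : Int)) (cs : List Char) :
    ∀ (used : PySem.Dict Char Int) (g : Char → Nat) (acc : List Char),
    (∀ c, used.getD c 0 = (g c : Int)) →
    ∃ U, cs.foldl (fun (st : PySem.Dict Char Int × List Char) ch =>
        if st.1.getD ch 0 < c2.getD ch 0 then (st.1.insert ch (st.1.getD ch 0 + 1), st.2)
        else (st.1, st.2 ++ [ch])) (used, acc)
      = (U, acc ++ out1 cnt cs g) ∧ ∀ c, U.getD c 0 = ((procG cnt cs g) c : Int) := by
  induction cs with
  | nil => intro used g acc h; exact ⟨used, by simp [out1], h⟩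
  | cons ch cs ih =>
    intro used g acc h
    rw [List.foldl_cons]
    by_cases hlt : g ch < cnt ch
    · have hcond : used.getD ch 0 < c2.getD ch 0 := by rw [h ch, hc2 ch]; exact_mod_cast hlt
      rw [if_pos hcond]
      have h' : ∀ c, (used.insert ch (used.getD ch 0 + 1)).getD c 0 = ((chInc g ch) c : Int) := by
        intro c
        rw [PySem.Dict.getD_insert]
        by_cases hc : c = ch
        · subst hc; rw [if_pos rfl, h c]; simp [chInc]
        · rw [if_neg hc, h c, chInc_apply_ne g ch c hc]
      obtain ⟨U, hU1, hU2⟩ := ih (used.insert ch (used.getD ch 0 + 1)) (chInc g ch) acc h'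
      exact ⟨U, by rw [hU1]; simp [out1, hlt], by simpa [procG, hlt] using hU2⟩
    · have hcond : ¬ used.getD ch 0 < c2.getD ch 0 := by rw [h ch, hc2 ch]; exact_mod_cast hlt
      rw [if_neg hcond]
      obtain ⟨U, hU1, hU2⟩ := ih used g (acc ++ [ch]) h
      exact ⟨U, by rw [hU1]; simp [out1, hlt], by simpa [procG, hlt] using hU2⟩

theorem b_pass2 (used : PySem.Dict Char Int) (gF : Char → Nat)
    (hU : ∀ c, used.getD c 0 = (gF c : Int)) (cs : List Char) :
    ∀ (seen : PySem.Dict Char Int) (n : Char → Nat) (acc : List Char),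
    (∀ c, seen.getD c 0 = (n c : Int)) →
    (cs.foldl (fun (st : PySem.Dict Char Int × List Char) ch =>
        let s := st.1.insert ch (st.1.getD ch 0 + 1)
        if s.getD ch 0 > used.getD ch 0 then (s, st.2 ++ [ch]) else (s, st.2)) (seen, acc)).2
      = acc ++ sKeep cs (fun c => gF c - n c) := by
  induction cs with
  | nil => intro seen n acc h; simp [sKeep]
  | cons ch cs ih =>
    intro seen n acc h
    rw [List.foldl_cons]
    have hs : ∀ c, (seen.insert ch (seen.getD ch 0 + 1)).getD c 0 = ((chInc n ch) c : Int) := by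
      intro c
      rw [PySem.Dict.getD_insert]
      by_cases hc : c = ch
      · subst hc; rw [if_pos rfl, h c]; simp [chInc]
      · rw [if_neg hc, h c, chInc_apply_ne n ch c hc]
    have hself : (seen.insert ch (seen.getD ch 0 + 1)).getD ch 0 = (n ch : Int) + 1 := by
      rw [PySem.Dict.getD_insert_self, h ch]
    by_cases hk : gF ch ≤ n ch
    · have hcond : (seen.insert ch (seen.getD ch 0 + 1)).getD ch 0 > used.getD ch 0 := by
        rw [hself, hU ch]; exact_mod_cast (by omega : gF ch < n ch + 1)
      change (List.foldl _ (if (seen.insert ch (seen.getD ch 0 + 1)).getD ch 0 > used.getD ch 0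
          then (seen.insert ch (seen.getD ch 0 + 1), acc ++ [ch])
          else (seen.insert ch (seen.getD ch 0 + 1), acc)) cs).2 = _
      rw [if_pos hcond]
      rw [ih _ (chInc n ch) (acc ++ [ch]) hs]
      have hfun : (fun c => gF c - chInc n ch c) = (fun c => gF c - n c) := by
        funext c
        by_cases hc : c = ch
        · subst hc; rw [chInc_apply_self]; omega
        · rw [chInc_apply_ne n ch c hc]
      rw [hfun]
      have : sKeep (ch :: cs) (fun c => gF c - n c) = ch :: sKeep cs (fun c => gF c - n c) := by
        simp only [sKeep, if_neg (by omega : ¬ 0 < gF ch - n ch)]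
      rw [this]
      simp
    · have hcond : ¬ (seen.insert ch (seen.getD ch 0 + 1)).getD ch 0 > used.getD ch 0 := by
        rw [hself, hU ch]; exact_mod_cast (by omega : ¬ (gF ch : Int) < (n ch : Int) + 1)
      change (List.foldl _ (if (seen.insert ch (seen.getD ch 0 + 1)).getD ch 0 > used.getD ch 0
          then (seen.insert ch (seen.getD ch 0 + 1), acc ++ [ch])
          else (seen.insert ch (seen.getD ch 0 + 1), acc)) cs).2 = _
      rw [if_neg hcond]
      rw [ih _ (chInc n ch) acc hs]
      have : sKeep (ch :: cs) (fun c => gF c - n c) = sKeep cs (chDec (fun c => gF c - n c) ch) := by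
        simp only [sKeep, if_pos (by omega : 0 < gF ch - n ch)]
      rw [this]
      have hfun : (fun c => gF c - chInc n ch c) = chDec (fun c => gF c - n c) ch := by
        funext c
        by_cases hc : c = ch
        · subst hc; rw [chInc_apply_self, chDec_apply_self]; omega
        · rw [chInc_apply_ne n ch c hc, chDec_apply_ne _ ch c hc]
      rw [hfun]

theorem maskL_zero2 (s : List Char) : maskL s (fun _ => 0) = s := by
  induction s with
  | nil => rfl
  | cons c cs ih => simp [maskL, ih]


theorem sKeep_zero (s : List Char) : sKeep s (fun _ => 0) = s := by
  induction s with
  | nil => rfl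
  | cons c cs ih => simp [sKeep, ih]

-- drop the first n '0'-entries of a list
def dropZeros : Nat → List Char → List Char
  | 0, l => l
  | _ + 1, [] => []
  | n + 1, a :: t => if a = '0' then dropZeros n t else a :: dropZeros (n + 1) t

theorem remove0_drop : ∀ (l : List Char), '0' ∈ l →
    PySem.List.remove? l '0' = some (dropZeros 1 l) := by
  intro l hl
  induction l with
  | nil => simp at hl
  | cons a t ih =>
    by_cases ha : a = '0'
    · subst ha; rw [remove0_cons_pos t]; simp [dropZeros]
    · have hm : '0' ∈ t := by
        rcases List.mem_cons.mp hl with h | h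
        · exact absurd h.symm ha
        · exact h
      rw [remove0_cons_neg a t ha, ih hm]
      simp [dropZeros, ha]

theorem count0_dropZeros_one : ∀ (l : List Char), '0' ∈ l →
    (dropZeros 1 l).count '0' + 1 = l.count '0' := by
  intro l hl
  induction l with
  | nil => simp at hl
  | cons a t ih =>
    by_cases ha : a = '0'
    · subst ha; simp [dropZeros, List.count_cons_self]
    · have hm : '0' ∈ t := by
        rcases List.mem_cons.mp hl with h | h
        · exact absurd h.symm ha
        · exact h
      simp only [dropZeros, if_neg ha]
      rw [List.count_cons_of_ne ha, List.count_cons_of_ne ha, ih hm]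

theorem dropZeros_one_comp (k : Nat) : ∀ (l : List Char),
    dropZeros k (dropZeros 1 l) = dropZeros (k + 1) l := by
  intro l
  induction l generalizing k with
  | nil => cases k <;> rfl
  | cons a t ih =>
    by_cases ha : a = '0'
    · subst ha; simp [dropZeros]
    · simp only [dropZeros, if_neg ha]
      cases k with
      | zero => simp [dropZeros, ha]
      | succ k' => simp only [dropZeros, if_neg ha, ih]

theorem remove_iter (n : Nat) :
    ∀ (l : List Char), n ≤ l.count '0' →
    (List.replicate n '0').foldl (fun a (_ : Char) => (PySem.List.remove? a '0').getD a) l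
      = dropZeros n l := by
  induction n with
  | zero => intro l _; simp [dropZeros]
  | succ k ih =>
    intro l hl
    have hm : '0' ∈ l := List.count_pos_iff.mp (by omega)
    rw [List.replicate_succ, List.foldl_cons, remove0_drop l hm]
    simp only [Option.getD_some]
    rw [ih (dropZeros 1 l) (by have := count0_dropZeros_one l hm; omega)]
    exact dropZeros_one_comp k l

theorem dropZeros_append (a : List Char) :
    ∀ (b : List Char) (n : Nat), a.count '0' = n →
    dropZeros n (a ++ b) = a.filter (· ≠ '0') ++ b := by
  induction a with
  | nil => intro b n hn; simp at hn; subst hn; simp [dropZeros]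
  | cons x t ih =>
    intro b n hn
    rw [List.cons_append]
    by_cases hx : x = '0'
    · subst hx
      rw [List.count_cons_self] at hn
      cases n with
      | zero => omega
      | succ m =>
        have h1 : dropZeros (m + 1) ('0' :: (t ++ b)) = dropZeros m (t ++ b) := by
          simp [dropZeros]
        rw [h1, ih b m (by omega), List.filter_cons_of_neg (by simp)]
    · rw [List.count_cons_of_ne hx] at hn
      have h1 : dropZeros n (x :: (t ++ b)) = x :: dropZeros n (t ++ b) := by
        cases n with
        | zero => simp [dropZeros]
        | succ m => simp [dropZeros, hx]
      rw [h1, ih b n hn, List.filter_cons_of_pos (by simp [hx])]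
      rfl

theorem dropZeros_eq_filter (a : List Char) (n : Nat) (hn : a.count '0' = n) :
    dropZeros n a = a.filter (· ≠ '0') := by
  have := dropZeros_append a [] n hn
  simpa using this

theorem maskL_append_zeros (zs : List Char) (hzs : ∀ c ∈ zs, c = '0') :
    ∀ (q : List Char), '0' ∉ q → ∀ g : Char → Nat, g '0' = 0 →
    maskL (q ++ zs) g = maskL q g ++ zs := by
  intro q hq
  induction q with
  | nil =>
    intro g hg
    simp only [List.nil_append, maskL]
    induction zs with
    | nil => rfl
    | cons z t ih =>
      have hz : z = '0' := hzs z (List.mem_cons_self ..)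
      subst hz
      simp only [maskL, hg, if_neg (by omega : ¬ 0 < 0)]
      rw [ih (fun c hc => hzs c (List.mem_cons_of_mem _ hc))]
  | cons d q ih =>
    intro g hg
    have hd : d ≠ '0' := fun h => hq (h ▸ List.mem_cons_self ..)
    have hq' : '0' ∉ q := fun h => hq (List.mem_cons_of_mem _ h)
    by_cases hgd : 0 < g d
    · simp only [List.cons_append, maskL, if_pos hgd]
      rw [ih hq' (chDec g d) (by rw [chDec_apply_ne g d '0' (Ne.symm hd)]; exact hg)]
    · simp only [List.cons_append, maskL, if_neg hgd]
      rw [ih hq' g hg]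

theorem sKeep_append_zeros (zs : List Char) (hzs : ∀ c ∈ zs, c = '0') :
    ∀ (q : List Char), '0' ∉ q → ∀ g : Char → Nat, g '0' = 0 →
    sKeep (q ++ zs) g = sKeep q g ++ zs := by
  intro q hq
  induction q with
  | nil =>
    intro g hg
    simp only [List.nil_append, sKeep]
    induction zs with
    | nil => rfl
    | cons z t ih =>
      have hz : z = '0' := hzs z (List.mem_cons_self ..)
      subst hz
      simp only [sKeep, hg, if_neg (by omega : ¬ 0 < 0)]
      rw [ih (fun c hc => hzs c (List.mem_cons_of_mem _ hc))]
  | cons d q ih =>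
    intro g hg
    have hd : d ≠ '0' := fun h => hq (h ▸ List.mem_cons_self ..)
    have hq' : '0' ∉ q := fun h => hq (List.mem_cons_of_mem _ h)
    by_cases hgd : 0 < g d
    · simp only [List.cons_append, sKeep, if_pos hgd]
      rw [ih hq' (chDec g d) (by rw [chDec_apply_ne g d '0' (Ne.symm hd)]; exact hg)]
    · simp only [List.cons_append, sKeep, if_neg hgd]
      rw [ih hq' g hg]

theorem procG_zero_char (cnt : Char → Nat) (rest : List Char) :
    ∀ g, (∀ c ∈ rest, c ≠ '0') → g '0' = 0 → procG cnt rest g '0' = 0 := by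
  induction rest with
  | nil => intro g _ hg; exact hg
  | cons c cs ih =>
    intro g hc hg
    have hc0 : c ≠ '0' := hc c (List.mem_cons_self ..)
    have hcs : ∀ d ∈ cs, d ≠ '0' := fun d hd => hc d (List.mem_cons_of_mem _ hd)
    by_cases hlt : g c < cnt c
    · simp only [procG, if_pos hlt]
      exact ih _ hcs (by rw [chInc_apply_ne g c '0' (Ne.symm hc0)]; exact hg)
    · simp only [procG, if_neg hlt]
      exact ih _ hcs hg

theorem proc_cnt_zero (cnt : Char → Nat) (rest : List Char) (h : ∀ c ∈ rest, cnt c = 0) :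
    ∀ g, procL1 cnt rest g = rest ∧ procG cnt rest g = g ∧ procM cnt rest g = 0
      ∧ out1 cnt rest g = rest := by
  induction rest with
  | nil => intro g; exact ⟨rfl, rfl, rfl, rfl⟩
  | cons c cs ih =>
    intro g
    have hc0 : cnt c = 0 := h c (List.mem_cons_self ..)
    have hcs : ∀ d ∈ cs, cnt d = 0 := fun d hd => h d (List.mem_cons_of_mem _ hd)
    have hlt : ¬ g c < cnt c := by omega
    obtain ⟨h1, h2, h3, h4⟩ := ih hcs g
    exact ⟨by simp [procL1, hlt, h1], by simp [procG, hlt, h2],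
      by simp [procM, hlt, h3], by simp [out1, hlt, h4]⟩

theorem A_norm (p1 p2 : String) (h1 : '0' ∉ p1.toList)
    (hbound : procM (fun c => p2.toList.count c) p1.toList (fun _ => 0)
      ≤ (maskL p2.toList (procG (fun c => p2.toList.count c) p1.toList (fun _ => 0))).count '0') :
    CompareStrike p1 p2 = String.ofList
      (out1 (fun c => p2.toList.count c) p1.toList (fun _ => 0)
        ++ dropZeros (procM (fun c => p2.toList.count c) p1.toList (fun _ => 0))
            (maskL p2.toList (procG (fun c => p2.toList.count c) p1.toList (fun _ => 0)))) := by
  have hc1 : ∀ c ∈ p1.toList, c ≠ '0' := fun c hc h => h1 (h ▸ hc)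
  set cnt : Char → Nat := fun c => p2.toList.count c with hcnt
  set z : Char → Nat := fun _ => 0 with hz
  unfold CompareStrike
  have hmask : p2.toList = maskL p2.toList z := (maskL_zero2 p2.toList).symm
  rw [List.range_eq_range']
  rw [show (List.range' 0 p1.toList.length) =
        (List.range' (List.length ([] : List Char)) p1.toList.length) by rfl]
  rw [show ((p1.toList, p2.toList, ([] : List Char)) :
        List Char × List Char × List Char)
      = (([] : List Char) ++ p1.toList, maskL p2.toList z, ([] : List Char)) by
    rw [← hmask]; rfl]
  rw [outer_inv p2.toList p1.toList [] z [] hc1]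
  simp only [List.nil_append]
  rw [PySem.List.foldl_prod_mk
    (f := fun a (_ : Char) => (PySem.List.remove? a '0').getD a)
    (g := fun a (_ : Char) => (PySem.List.remove? a '0').getD a)]
  rw [remove_iter _ _ (le_of_eq (count0_procL1 cnt p1.toList z hc1).symm)]
  rw [remove_iter _ _ hbound]
  rw [dropZeros_eq_filter _ _ (count0_procL1 cnt p1.toList z hc1),
    filter_procL1 cnt p1.toList z hc1]

theorem B_norm (p1 p2 : String) :
    CompareStrike_alt p1 p2 = String.ofList
      (out1 (fun c => p2.toList.count c) p1.toList (fun _ => 0)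
        ++ sKeep p2.toList (procG (fun c => p2.toList.count c) p1.toList (fun _ => 0))) := by
  set cnt : Char → Nat := fun c => p2.toList.count c with hcnt
  set z : Char → Nat := fun _ => 0 with hz
  set gF : Char → Nat := procG cnt p1.toList z with hgF
  have hc2 : ∀ c, (p2.toList.foldl (fun d ch => d.insert ch (d.getD ch 0 + 1))
      (PySem.Dict.empty : PySem.Dict Char Int)).getD c 0 = (cnt c : Int) := by
    intro c
    rw [PySem.Dict.getD_foldl_insert_add_one]
    simp [PySem.Dict.getD_empty, hcnt]
  have hempty : ∀ c, (PySem.Dict.empty : PySem.Dict Char Int).getD c 0 = (z c : Int) := by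
    intro c; simp [PySem.Dict.getD_empty, hz]
  obtain ⟨U, hU1, hU2⟩ := b_pass1 cnt _ hc2 p1.toList PySem.Dict.empty z [] hempty
  rw [List.nil_append] at hU1
  unfold CompareStrike_alt
  simp only []
  rw [hU1]
  have := b_pass2 U gF hU2 p2.toList PySem.Dict.empty z (out1 cnt p1.toList z) hempty
  simp only at this ⊢
  rw [this]
  have : (fun c => gF c - z c) = gF := by funext c; simp [hz]
  rw [this]

theorem CompareStrike_eq (p1 p2 : String) (h1 : '0' ∉ p1.toList)
    (hp : (∀ c ∈ p2.toList.dropWhile (· ≠ '0'), c = '0') ∨ (∀ c ∈ p1.toList, c ∉ p2.toList)) :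
    CompareStrike p1 p2 = CompareStrike_alt p1 p2 := by
  have hc1 : ∀ c ∈ p1.toList, c ≠ '0' := fun c hc h => h1 (h ▸ hc)
  set cnt : Char → Nat := fun c => p2.toList.count c with hcnt
  set z : Char → Nat := fun _ => 0 with hz
  set gF : Char → Nat := procG cnt p1.toList z with hgF
  set M : Nat := procM cnt p1.toList z with hM
  rcases hp with hzsuf | hdisj
  · -- the '0's of p2 form a trailing block
    set q : List Char := p2.toList.takeWhile (· ≠ '0') with hqdef
    set zs : List Char := p2.toList.dropWhile (· ≠ '0') with hzsdef
    have hqz : q ++ zs = p2.toList := List.takeWhile_append_dropWhile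
    have hq : '0' ∉ q := by
      intro h
      have := List.mem_takeWhile_imp h
      simp at this
    have hg0 : gF '0' = 0 := procG_zero_char cnt p1.toList z hc1 rfl
    have hmask : maskL p2.toList gF = maskL q gF ++ zs := by
      rw [← hqz]
      exact maskL_append_zeros zs hzsuf q hq gF hg0
    have hcntq : ∀ c ∈ p1.toList, cnt c = q.count c := by
      intro c hc
      have hc0 : c ≠ '0' := hc1 c hc
      have hcz : c ∉ zs := fun h => hc0 (hzsuf c h)
      rw [hcnt]
      simp only [← hqz, List.count_append, List.count_eq_zero.mpr hcz, Nat.add_zero]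
    have hMq : (maskL q gF).count '0' = M := by
      rw [hgF, hM, count0_maskL_procG q hq cnt p1.toList z hc1 hcntq,
        maskL_zero2 q, List.count_eq_zero.mpr hq, Nat.zero_add]
    have hbound : M ≤ (maskL p2.toList gF).count '0' := by
      rw [hmask, List.count_append, hMq]
      omega
    have hskeep : sKeep p2.toList gF = sKeep q gF ++ zs := by
      rw [← hqz]
      exact sKeep_append_zeros zs hzsuf q hq gF hg0
    rw [A_norm p1 p2 h1 hbound, B_norm p1 p2, ← hcnt, ← hz, ← hgF, ← hM]
    rw [hmask, dropZeros_append (maskL q gF) zs M hMq, filter_maskL q hq gF, hskeep]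
  · -- p1 and p2 share no character: no strikes at all
    have hcnt0 : ∀ c ∈ p1.toList, cnt c = 0 := by
      intro c hc
      rw [hcnt]
      exact List.count_eq_zero.mpr (hdisj c hc)
    obtain ⟨hL1, hG, hM0, hout⟩ := proc_cnt_zero cnt p1.toList hcnt0 z
    have hbound : M ≤ (maskL p2.toList gF).count '0' := by
      rw [hM, hM0]
      omega
    rw [A_norm p1 p2 h1 hbound, B_norm p1 p2, ← hcnt, ← hz, ← hgF, ← hM]
    rw [hM, hM0, hgF, hG, hz]
    simp only [dropZeros, maskL_zero2, sKeep_zero]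

-- ===== VERDICT (by name: the statement is the Claim_ definition above) =====
theorem CompareStrike_spec : Claim_equal_CompareStrike := by
  intro p1 p2 _ hpre
  obtain ⟨h1, hp⟩ := hpre
  apply CompareStrike_eq p1 p2 h1
  rcases hp with hb | hb
  · left
    intro c hc
    exact eq_of_beq (List.all_eq_true.mp hb c hc)
  · right
    intro c hc
    have := List.all_eq_true.mp hb c hc
    simpa using this
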